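-- pv_equiv track=rewrite | github.com/pypi-data/pypi-mirror-44 | packages/riemann-tx/riemann_tx-1.1.7-py3-none-any.whl/riemann/utils.py | i2le_script
-- ===== SOURCE A (Python) =====
-- def i2le_script(number):
--     '''Convert int to signed little endian (l.e.) hex for scripts
--     Args:
--         number  (int): int value to convert to bytes in l.e. format
--     Returns:
--                 (str): the hex-encoded signed LE number
--     '''
--     if number == 0:
--         return '00'
--     for i in range(80):
--         try:
--             return number.to_bytes(
--                 length=i,  # minimal bytes lol
--                 byteorder='little',
--                 signed=True).hex()
--         except Exception:
--             continue
-- ===== SOURCE B (Python) =====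
-- def i2le_script(number):
--     '''Convert int to signed little endian (l.e.) hex for scripts'''
--     if number == 0:
--         return '00'
--     digits = []
--     n = number
--     while True:
--         b = n % 256
--         n //= 256
--         digits.append('%02x' % b)
--         if (n == 0 and b < 128) or (n == -1 and b >= 128):
--             return ''.join(digits)
-- ===== Notes on version B (the rewrite author's own statement) =====
-- stated objective: alternative
-- what changed: Replaces the trial loop over to_bytes lengths 0..79 (catching OverflowError on each failure) with a single digit-extraction loop that emits the little-endian bytes of the two's-complement value one at a time and stops when the remaining quotient is the sign extension of the last byte.
-- intended difference: For number = -1, A returns '' because CPython's length-0 signed to_bytes accidentally accepts -1; B returns 'ff', the correct minimal signed little-endian encoding of -1. — e.g. on i2le_script(-1): A returns "", B returns "ff"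
import Mathlib
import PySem

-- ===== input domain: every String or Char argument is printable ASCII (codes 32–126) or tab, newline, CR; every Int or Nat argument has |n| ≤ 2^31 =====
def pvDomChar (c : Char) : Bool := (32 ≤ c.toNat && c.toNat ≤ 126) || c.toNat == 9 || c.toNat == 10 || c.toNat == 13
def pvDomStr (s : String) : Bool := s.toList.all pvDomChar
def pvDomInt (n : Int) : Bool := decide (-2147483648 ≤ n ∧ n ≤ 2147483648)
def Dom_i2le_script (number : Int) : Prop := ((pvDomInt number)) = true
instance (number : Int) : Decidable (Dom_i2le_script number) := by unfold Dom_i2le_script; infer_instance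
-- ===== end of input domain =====

-- B replaces A's trial loop over to_bytes lengths 0..79 (try/except probing) by a single
-- digit-extraction loop emitting the little-endian two's-complement bytes one at a time
-- (objective: alternative algorithm, same cost class).
-- Intended difference: for number = -1 A returns '' (CPython length-0 signed to_bytes quirk), B returns 'ff'.


-- ===== PORT A =====

def pvHexDigit (n : Nat) : Char := if n < 10 then Char.ofNat (48 + n) else Char.ofNat (87 + n)

-- the bytes of n.to_bytes(len,'little',signed=True), hex-encoded: byte i is (n >> 8i) & 0xff,
-- i.e. little-endian base-256 digits of the two's-complement value ('/' '%' here are Lean's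
-- ediv/emod, exact for the positive divisor 256)
def pvBytesLEHex : Nat → Int → List Char
  | 0, _ => []
  | k + 1, m =>
    pvHexDigit ((m % 256).toNat / 16) :: pvHexDigit ((m % 256).toNat % 16) :: pvBytesLEHex k (m / 256)

-- n.to_bytes(len,'little',signed=True).hex()
def pvToBytesHex (len : Nat) (n : Int) : String := String.mk (pvBytesLEHex len n)

-- whether n.to_bytes(len,'little',signed=True) succeeds (no OverflowError).
-- CPython 3.11 quirk, faithfully ported: length 0 accepts BOTH 0 and -1.
def pvOkLen (len : Nat) (n : Int) : Bool :=
  match len with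
  | 0 => n == 0 || n == -1
  | k + 1 => decide (-((2 : Int) ^ (8 * k + 7)) ≤ n ∧ n < (2 : Int) ^ (8 * k + 7))

-- the `for i in range(80): try … except: continue` loop; fuel = remaining iterations.
-- When the loop exhausts (only for |number| ≥ 2^631, excluded by Pre_) Python returns None; we return "".
def i2le_loopA (number : Int) (i : Nat) : Nat → String
  | 0 => ""
  | fuel + 1 =>
    if pvOkLen i number then pvToBytesHex i number
    else i2le_loopA number (i + 1) fuel

def i2le_script (number : Int) : String :=
  if number = 0 then "00" else i2le_loopA number 0 80

-- ===== PORT B =====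

-- '%02x' % b for a byte 0 ≤ b < 256
def pvHexPair (b : Nat) : List Char := [pvHexDigit (b / 16), pvHexDigit (b % 16)]

-- the `while True` loop of Source B: emit the byte n % 256, shift n //= 256, stop when the
-- quotient is the sign extension of the byte just emitted
def i2le_loopB (n : Int) : List Char :=
  if (PySem.Int.floordiv n 256 = 0 ∧ PySem.Int.mod n 256 < 128) ∨
     (PySem.Int.floordiv n 256 = -1 ∧ 128 ≤ PySem.Int.mod n 256) then
    pvHexPair (PySem.Int.mod n 256).toNat
  else
    pvHexPair (PySem.Int.mod n 256).toNat ++ i2le_loopB (PySem.Int.floordiv n 256)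
termination_by n.natAbs
decreasing_by
  rename_i h
  rw [PySem.Int.floordiv_eq_ediv_of_pos (by norm_num : (0:Int) < 256)] at h ⊢
  rw [PySem.Int.mod_eq_emod_of_pos (by norm_num : (0:Int) < 256)] at h
  omega

def i2le_script_alt (number : Int) : String :=
  if number = 0 then "00" else String.mk (i2le_loopB number)

-- ===== PRECONDITION & SPEC =====
-- Pre_ excludes the inputs with |number| too large for A's 80-length loop: there A falls off the
-- loop and returns None, not a str (B returns the hex encoding).  No input inside Dom_ is excluded.
-- the bound literal is 2 ^ 631 (written out so the Decidable instance evaluates by 'decide')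
def Pre_i2le_script (number : Int) : Prop :=
  -(8911016831293350036408538292383381493932086928219843614412485386522021810954448020519360959604241015192660760885926576778688876408936402340337229140082449586429677098359892480630613656731648 : Int) ≤ number ∧ number < (8911016831293350036408538292383381493932086928219843614412485386522021810954448020519360959604241015192660760885926576778688876408936402340337229140082449586429677098359892480630613656731648 : Int)

instance (number : Int) : Decidable (Pre_i2le_script number) := by
  unfold Pre_i2le_script; infer_instance

def pvWitness_i2le_script : Int := (5)

-- For number = -1, A returns '' (CPython's length-0 signed to_bytes accidentally accepts -1);
-- B returns 'ff', the correct minimal signed little-endian encoding of -1.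
def D_i2le_script (number : Int) : Prop := number = -1
instance (number : Int) : Decidable (D_i2le_script number) := by unfold D_i2le_script; infer_instance

def Spec_i2le_script (number : Int) (out : String) : Prop :=
  ¬ D_i2le_script number → out = i2le_script_alt number
instance (number : Int) (out : String) : Decidable (Spec_i2le_script number out) := by
  unfold Spec_i2le_script; infer_instance

def pvDiffWitness_i2le_script : Int := (-1)
def pvDiffWitnessOut_i2le_script : String × String := ("", "ff")

-- ===== CLAIM (what is proved, stated in full; the proofs are below) =====
def Claim_unchanged_i2le_script : Prop := ∀ (number : Int), Dom_i2le_script number → Pre_i2le_script number → Spec_i2le_script number (i2le_script number)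
def Claim_changed_i2le_script : Prop := Dom_i2le_script (pvDiffWitness_i2le_script) ∧ Pre_i2le_script (pvDiffWitness_i2le_script) ∧ D_i2le_script (pvDiffWitness_i2le_script) ∧ i2le_script (pvDiffWitness_i2le_script) = pvDiffWitnessOut_i2le_script.1 ∧ i2le_script_alt (pvDiffWitness_i2le_script) = pvDiffWitnessOut_i2le_script.2 ∧ pvDiffWitnessOut_i2le_script.1 ≠ pvDiffWitnessOut_i2le_script.2
def Claim_exact_i2le_script : Prop := ∀ (number : Int), Dom_i2le_script number → Pre_i2le_script number → D_i2le_script number → i2le_script number ≠ i2le_script_alt number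

-- ===== LEMMAS AND PROOFS =====

-- A's loop returns the value at the first accepted length L, given all smaller lengths fail.
lemma loopA_eq (n : Int) (L : Nat) (hok : pvOkLen L n = true)
    (hfail : ∀ j, j < L → pvOkLen j n = false) :
    ∀ fuel i, i ≤ L → L < i + fuel → i2le_loopA n i fuel = pvToBytesHex L n := by
  intro fuel
  induction fuel with
  | zero => intro i h1 h2; omega
  | succ f ih =>
    intro i h1 h2
    simp only [i2le_loopA]
    by_cases h : pvOkLen i n = true
    · have hiL : i = L := by
        by_contra hne
        have hlt : i < L := lt_of_le_of_ne h1 hne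
        rw [hfail i hlt] at h; exact Bool.false_ne_true h
      rw [hiL, if_pos hok]
    · rw [if_neg h]
      have hiL : i ≠ L := fun e => h (e ▸ hok)
      exact ih (i + 1) (by omega) (by omega)

-- cast bridges between Nat natAbs bounds and Int bounds (x nonneg)
lemma int_lt_pow_of_natAbs {x : Int} (hx : 0 ≤ x) {e : Nat} (h : x.natAbs < 2 ^ e) :
    x < (2 : Int) ^ e := by
  have h2 : ((x.natAbs : Nat) : Int) < (((2 : Nat) ^ e : Nat) : Int) := by exact_mod_cast h
  rw [Int.natAbs_of_nonneg hx] at h2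
  push_cast at h2
  exact h2

lemma pow_le_int_of_natAbs {x : Int} (hx : 0 ≤ x) {e : Nat} (h : 2 ^ e ≤ x.natAbs) :
    (2 : Int) ^ e ≤ x := by
  have h2 : (((2 : Nat) ^ e : Nat) : Int) ≤ ((x.natAbs : Nat) : Int) := by exact_mod_cast h
  rw [Int.natAbs_of_nonneg hx] at h2
  push_cast at h2
  exact h2

lemma natAbs_lt_pow_of_int {x : Int} (hx : 0 ≤ x) {e : Nat} (h : x < (2 : Int) ^ e) :
    x.natAbs < 2 ^ e := by
  have h2 : ((x.natAbs : Nat) : Int) < (((2 : Nat) ^ e : Nat) : Int) := by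
    rw [Int.natAbs_of_nonneg hx]; push_cast; exact h
  exact_mod_cast h2

-- success at the minimal length bitLength-based L+1 (L = bits / 8)
lemma ok_at_L (n : Int) (hn : n ≠ 0) (hn1 : n ≠ -1) :
    pvOkLen ((if n > 0 then PySem.Int.bitLength n else PySem.Int.bitLength (-n - 1)) / 8 + 1) n = true := by
  by_cases hp : n > 0
  · rw [if_pos hp]
    set b := PySem.Int.bitLength n with hb
    have h1 : n.natAbs < 2 ^ b := PySem.Int.lt_two_pow_bitLength n
    have h3 : n.natAbs < 2 ^ (8 * (b / 8) + 7) :=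
      lt_of_lt_of_le h1 (Nat.pow_le_pow_right (by norm_num) (by omega))
    have h4 : n < (2 : Int) ^ (8 * (b / 8) + 7) := int_lt_pow_of_natAbs (le_of_lt hp) h3
    have hpos : (0 : Int) < (2 : Int) ^ (8 * (b / 8) + 7) := by positivity
    simp only [pvOkLen, decide_eq_true_eq]
    exact ⟨by linarith, h4⟩
  · rw [if_neg hp]
    have hneg : n < 0 := by omega
    set m : Int := -n - 1 with hm
    have hm0 : 0 ≤ m := by omega
    set b := PySem.Int.bitLength m with hb
    have h1 : m.natAbs < 2 ^ b := PySem.Int.lt_two_pow_bitLength m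
    have h3 : m.natAbs < 2 ^ (8 * (b / 8) + 7) :=
      lt_of_lt_of_le h1 (Nat.pow_le_pow_right (by norm_num) (by omega))
    have h4 : m < (2 : Int) ^ (8 * (b / 8) + 7) := int_lt_pow_of_natAbs hm0 h3
    have hpos : (0 : Int) < (2 : Int) ^ (8 * (b / 8) + 7) := by positivity
    simp only [pvOkLen, decide_eq_true_eq]
    constructor
    · have : n = -m - 1 := by omega
      linarith
    · linarith

-- failure below that length
lemma fail_below_L (n : Int) (hn : n ≠ 0) (hn1 : n ≠ -1) :
    ∀ j, j < (if n > 0 then PySem.Int.bitLength n else PySem.Int.bitLength (-n - 1)) / 8 + 1 →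
      pvOkLen j n = false := by
  intro j hj
  match j with
  | 0 =>
    simp only [pvOkLen, Bool.or_eq_false_iff]
    exact ⟨by simpa using hn, by simpa using hn1⟩
  | k + 1 =>
    by_cases hp : n > 0
    · rw [if_pos hp] at hj
      set b := PySem.Int.bitLength n with hb
      have hk : 8 * k + 7 ≤ b - 1 := by omega
      have h1 : 2 ^ (b - 1) ≤ n.natAbs := PySem.Int.two_pow_bitLength_le n hn
      have h3 : (2 : Nat) ^ (8 * k + 7) ≤ n.natAbs :=
        le_trans (Nat.pow_le_pow_right (by norm_num) hk) h1
      have h4 : (2 : Int) ^ (8 * k + 7) ≤ n := pow_le_int_of_natAbs (le_of_lt hp) h3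
      simp only [pvOkLen, decide_eq_false_iff_not, not_and, not_lt]
      intro _; exact h4
    · rw [if_neg hp] at hj
      have hneg : n < 0 := by omega
      set m : Int := -n - 1 with hm
      set b := PySem.Int.bitLength m with hb
      have hk : 8 * k + 7 ≤ b - 1 := by omega
      have hm0 : m ≠ 0 := by
        intro h
        have hb0 : b = 0 := by rw [hb, h]; exact PySem.Int.bitLength_zero
        omega
      have h1 : 2 ^ (b - 1) ≤ m.natAbs := PySem.Int.two_pow_bitLength_le m hm0
      have h3 : (2 : Nat) ^ (8 * k + 7) ≤ m.natAbs :=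
        le_trans (Nat.pow_le_pow_right (by norm_num) hk) h1
      have h4 : (2 : Int) ^ (8 * k + 7) ≤ m := pow_le_int_of_natAbs (by omega) h3
      simp only [pvOkLen, decide_eq_false_iff_not]
      intro hcon
      have hlow := hcon.1
      have : n = -m - 1 := by omega
      linarith

set_option maxRecDepth 8192 in
lemma two_pow_631 : ((8911016831293350036408538292383381493932086928219843614412485386522021810954448020519360959604241015192660760885926576778688876408936402340337229140082449586429677098359892480630613656731648 : Int)) = 2 ^ 631 := by
  decide

-- the bitLength-based length is below A's loop bound inside Pre_
lemma L_lt_80 (n : Int) (hn : n ≠ 0) (hpre : Pre_i2le_script n) :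
    (if n > 0 then PySem.Int.bitLength n else PySem.Int.bitLength (-n - 1)) / 8 + 1 < 80 := by
  obtain ⟨hlo, hhi⟩ := hpre
  have hpow := two_pow_631
  rw [hpow] at hlo hhi
  by_cases hp : n > 0
  · rw [if_pos hp]
    set b := PySem.Int.bitLength n with hb
    have h1 : 2 ^ (b - 1) ≤ n.natAbs := PySem.Int.two_pow_bitLength_le n hn
    have h2 : n.natAbs < 2 ^ 631 := natAbs_lt_pow_of_int (le_of_lt hp) hhi
    have : b - 1 < 631 := (Nat.pow_lt_pow_iff_right (by norm_num)).mp (lt_of_le_of_lt h1 h2)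
    omega
  · rw [if_neg hp]
    have hneg : n < 0 := by omega
    set m : Int := -n - 1 with hm
    set b := PySem.Int.bitLength m with hb
    by_cases hm0 : m = 0
    · have hb0 : b = 0 := by rw [hb, hm0]; exact PySem.Int.bitLength_zero
      omega
    · have h1 : 2 ^ (b - 1) ≤ m.natAbs := PySem.Int.two_pow_bitLength_le m hm0
      have h2 : m.natAbs < 2 ^ 631 := natAbs_lt_pow_of_int (by omega) (by linarith)
      have : b - 1 < 631 := (Nat.pow_lt_pow_iff_right (by norm_num)).mp (lt_of_le_of_lt h1 h2)
      omega

-- B's loop equals the L+1-byte little-endian hex when n fits in L+1 bytes but (for L ≥ 1) not in L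
lemma loopB_eq : ∀ (L : Nat) (n : Int),
    -((2 : Int) ^ (8 * L + 7)) ≤ n → n < (2 : Int) ^ (8 * L + 7) →
    (L = 0 ∨ n < -((2 : Int) ^ (8 * L - 1)) ∨ (2 : Int) ^ (8 * L - 1) ≤ n) →
    i2le_loopB n = pvBytesLEHex (L + 1) n := by
  intro L
  induction L with
  | zero =>
    intro n hlo hhi _
    norm_num at hlo hhi
    have hc : ((PySem.Int.floordiv n 256 = 0 ∧ PySem.Int.mod n 256 < 128) ∨
        (PySem.Int.floordiv n 256 = -1 ∧ 128 ≤ PySem.Int.mod n 256)) := by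
      rw [PySem.Int.floordiv_eq_ediv_of_pos (by norm_num : (0:Int) < 256),
          PySem.Int.mod_eq_emod_of_pos (by norm_num : (0:Int) < 256)]
      omega
    unfold i2le_loopB
    rw [if_pos hc, PySem.Int.mod_eq_emod_of_pos (by norm_num : (0:Int) < 256)]
    simp [pvBytesLEHex, pvHexPair]
  | succ K ih =>
    intro n hlo hhi hmin
    have hpow : (2 : Int) ^ (8 * (K + 1) + 7) = 256 * 2 ^ (8 * K + 7) := by
      rw [show 8 * (K + 1) + 7 = (8 * K + 7) + 8 from by ring, pow_add]; ring
    rw [hpow] at hlo hhi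
    have h128 : (128 : Int) ≤ 2 ^ (8 * K + 7) := by
      calc (128 : Int) = 2 ^ 7 := by norm_num
        _ ≤ 2 ^ (8 * K + 7) := pow_le_pow_right₀ (by norm_num) (by omega)
    have hmin' : n < -((2 : Int) ^ (8 * K + 7)) ∨ (2 : Int) ^ (8 * K + 7) ≤ n := by
      rcases hmin with h0 | h
      · exact absurd h0 (by omega)
      · rwa [show 8 * (K + 1) - 1 = 8 * K + 7 from by omega] at h
    set a := (2 : Int) ^ (8 * K + 7) with hadef
    have hc : ¬((PySem.Int.floordiv n 256 = 0 ∧ PySem.Int.mod n 256 < 128) ∨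
        (PySem.Int.floordiv n 256 = -1 ∧ 128 ≤ PySem.Int.mod n 256)) := by
      rw [PySem.Int.floordiv_eq_ediv_of_pos (by norm_num : (0:Int) < 256),
          PySem.Int.mod_eq_emod_of_pos (by norm_num : (0:Int) < 256)]
      omega
    unfold i2le_loopB
    rw [if_neg hc, PySem.Int.floordiv_eq_ediv_of_pos (by norm_num : (0:Int) < 256),
        PySem.Int.mod_eq_emod_of_pos (by norm_num : (0:Int) < 256)]
    have hrec : i2le_loopB (n / 256) = pvBytesLEHex (K + 1) (n / 256) := by
      apply ih
      · omega
      · omega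
      · rcases Nat.eq_zero_or_pos K with hK | hK
        · exact Or.inl hK
        · right
          have hb : a = 256 * (2 : Int) ^ (8 * K - 1) := by
            rw [hadef, show 8 * K + 7 = (8 * K - 1) + 8 from by omega, pow_add]; ring
          rw [hb] at hmin'
          omega
    rw [hrec]
    simp [pvBytesLEHex, pvHexPair]

-- closed-form value of B's port at -1 (i2le_loopB is a well-founded recursion, so 'decide'
-- cannot evaluate it; unfold its one stopping step by hand)
lemma alt_at_neg_one : i2le_script_alt (-1) = "ff" := by
  have h1 : PySem.Int.floordiv (-1 : Int) 256 = -1 := by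
    rw [PySem.Int.floordiv_eq_ediv_of_pos (by norm_num : (0:Int) < 256)]; decide
  have h2 : PySem.Int.mod (-1 : Int) 256 = 255 := by
    rw [PySem.Int.mod_eq_emod_of_pos (by norm_num : (0:Int) < 256)]; decide
  have hloop : i2le_loopB (-1) = ['f', 'f'] := by
    unfold i2le_loopB
    rw [if_pos (by rw [h1, h2]; norm_num)]
    rw [h2]
    decide
  unfold i2le_script_alt
  rw [if_neg (by norm_num), hloop]
  rfl

-- ===== VERDICT (by name: the statement is the Claim_ definition above) =====
theorem i2le_script_spec : Claim_unchanged_i2le_script := by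
  intro n _ hpre hD
  have hn1 : n ≠ -1 := hD
  by_cases hn : n = 0
  · subst hn; rfl
  · unfold i2le_script i2le_script_alt
    rw [if_neg hn, if_neg hn]
    set L : Nat := (if n > 0 then PySem.Int.bitLength n else PySem.Int.bitLength (-n - 1)) / 8 with hLdef
    have hok := ok_at_L n hn hn1
    have hfail := fail_below_L n hn hn1
    rw [loopA_eq n (L + 1) hok hfail 80 0 (by omega) (by simpa using L_lt_80 n hn hpre)]
    have hbounds : -((2 : Int) ^ (8 * L + 7)) ≤ n ∧ n < (2 : Int) ^ (8 * L + 7) := by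
      simpa only [pvOkLen, decide_eq_true_eq] using hok
    have hmin : L = 0 ∨ n < -((2 : Int) ^ (8 * L - 1)) ∨ (2 : Int) ^ (8 * L - 1) ≤ n := by
      rcases Nat.eq_zero_or_pos L with hL | hL
      · exact Or.inl hL
      · obtain ⟨K, hK⟩ : ∃ K, L = K + 1 := ⟨L - 1, by omega⟩
        have hf := hfail (K + 1) (by rw [← hLdef]; omega)
        simp only [pvOkLen, decide_eq_false_iff_not] at hf
        push_neg at hf
        rw [hK, show 8 * (K + 1) - 1 = 8 * K + 7 from by omega]
        rcases le_or_gt (-((2 : Int) ^ (8 * K + 7))) n with hge | hlt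
        · exact Or.inr (Or.inr (hf hge))
        · exact Or.inr (Or.inl hlt)
    rw [loopB_eq L n hbounds.1 hbounds.2 hmin]
    rfl

theorem i2le_script_changed : Claim_changed_i2le_script := by
  unfold Claim_changed_i2le_script
  refine ⟨by decide, by decide, by decide, by decide, ?_, by decide⟩
  exact alt_at_neg_one

theorem i2le_script_tight : Claim_exact_i2le_script := by
  intro n _ _ hD
  rw [hD, alt_at_neg_one]
  decide
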